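-- pv_equiv track=rewrite | github.com/Hacck3y/git-launchpad | backend/deployer.py | _detect_services_from_env
-- ===== SOURCE A (Python) =====
-- from typing import Optional, Dict, Any, List
--
-- SERVICE_DETECT_PATTERNS = {
--     "mysql": ["MYSQL", "DB_HOST", "DB_PORT", "DB_USER", "DB_PASSWORD", "DB_NAME", "MYSQL_URL", "MYSQL_URI"],
--     "postgres": ["POSTGRES", "DATABASE_URL", "PG_", "PGHOST", "PGDATABASE", "PGUSER", "PGPASSWORD"],
--     "redis": ["REDIS_URL", "REDIS_HOST", "REDIS_PORT", "IOREDIS"],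
--     "mongodb": ["MONGODB_URI", "MONGO_URL", "MONGO_URI", "MONGODB_URL"],
-- }
--
-- def _detect_services_from_env(env_keys: List[str]) -> List[str]:
--     """Detect which services are needed based on env var keys."""
--     detected = set()
--     for key in env_keys:
--         key_upper = key.upper()
--         for service, patterns in SERVICE_DETECT_PATTERNS.items():
--             for pattern in patterns:
--                 if pattern in key_upper:
--                     detected.add(service)
--                     break
--     return list(detected)
-- ===== SOURCE B (Python) =====
-- from typing import List
--
-- SERVICE_DETECT_PATTERNS = {
--     "mysql": ["MYSQL", "DB_HOST", "DB_PORT", "DB_USER", "DB_PASSWORD", "DB_NAME", "MYSQL_URL", "MYSQL_URI"],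
--     "postgres": ["POSTGRES", "DATABASE_URL", "PG_", "PGHOST", "PGDATABASE", "PGUSER", "PGPASSWORD"],
--     "redis": ["REDIS_URL", "REDIS_HOST", "REDIS_PORT", "IOREDIS"],
--     "mongodb": ["MONGODB_URI", "MONGO_URL", "MONGO_URI", "MONGODB_URL"],
-- }
--
-- def _detect_services_from_env(env_keys: List[str]) -> List[str]:
--     """Detect which services are needed based on env var keys.
--
--     Joins all uppercased keys into ONE haystack separated by '\n' (a character
--     that occurs in no pattern, so a pattern matches the haystack iff it matches
--     some individual key) and runs a single substring test per pattern, instead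
--     of scanning every key against every pattern.  Returns the detected services
--     sorted (same set as the original; its list(set) order is arbitrary)."""
--     haystack = "\n".join(k.upper() for k in env_keys)
--     return sorted(service for service, patterns in SERVICE_DETECT_PATTERNS.items()
--                   if any(p in haystack for p in patterns))
-- ===== Notes on version B (the rewrite author's own statement) =====
-- stated objective: alternative
-- what changed: B never iterates over the keys during matching: it joins all uppercased keys into one '\n'-separated haystack (no pattern contains '\n', so a pattern occurs in the haystack iff it occurs in some key) and decides each service with one substring test per pattern over that single string, returning the sorted detected services; A scans keys outer, patterns inner, mutating an accumulator set with per-key break.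
import Mathlib
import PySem

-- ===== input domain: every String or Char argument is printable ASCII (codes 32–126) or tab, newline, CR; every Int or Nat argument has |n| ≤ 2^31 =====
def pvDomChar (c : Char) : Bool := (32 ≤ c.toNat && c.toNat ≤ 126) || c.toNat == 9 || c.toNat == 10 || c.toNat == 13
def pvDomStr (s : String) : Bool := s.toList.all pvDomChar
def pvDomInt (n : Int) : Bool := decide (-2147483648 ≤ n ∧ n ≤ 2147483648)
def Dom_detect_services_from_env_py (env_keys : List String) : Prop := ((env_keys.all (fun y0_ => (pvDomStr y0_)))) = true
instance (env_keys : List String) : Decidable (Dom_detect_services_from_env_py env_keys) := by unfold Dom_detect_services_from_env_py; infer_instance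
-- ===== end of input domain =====

-- B joins all uppercased keys into one '\n'-separated haystack (no pattern contains '\n')
-- and runs one substring test per pattern over it, instead of A's key-outer/pattern-inner
-- scan with an accumulator set; both Pythons return list(set), whose iteration order is
-- arbitrary, so both ports realise the result set as its sorted listing (outputs are
-- compared as sets).

-- ===== PORT A =====
-- SERVICE_DETECT_PATTERNS as an insertion-ordered association list
def pvServicePatterns : List (String × List String) :=
  [("mysql", ["MYSQL", "DB_HOST", "DB_PORT", "DB_USER", "DB_PASSWORD", "DB_NAME", "MYSQL_URL", "MYSQL_URI"]),
   ("postgres", ["POSTGRES", "DATABASE_URL", "PG_", "PGHOST", "PGDATABASE", "PGUSER", "PGPASSWORD"]),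
   ("redis", ["REDIS_URL", "REDIS_HOST", "REDIS_PORT", "IOREDIS"]),
   ("mongodb", ["MONGODB_URI", "MONGO_URL", "MONGO_URI", "MONGODB_URL"])]

-- 'for pattern in patterns: if pattern in key_upper: detected.add(service); break'
def pvAddIfMatch (acc : PySem.Set String) (service : String) (patterns : List String) (keyU : String) : PySem.Set String :=
  match patterns with
  | [] => acc
  | p :: ps => if PySem.Str.isIn p keyU then PySem.Set.add acc service else pvAddIfMatch acc service ps keyU

def detect_services_from_env_py (env_keys : List String) : List String :=
  let detected : PySem.Set String :=
    env_keys.foldl (fun acc key =>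
      let keyU := PySem.Str.upper key
      pvServicePatterns.foldl (fun a sp => pvAddIfMatch a sp.1 sp.2 keyU) acc)
      PySem.Set.empty
  -- list(detected): Python set iteration order is not modelled; canonical sorted listing of the set
  PySem.List.sorted detected (fun x => x) false

-- ===== PORT B =====
def detect_services_from_env_py_alt (env_keys : List String) : List String :=
  -- haystack = "\n".join(k.upper() for k in env_keys)
  let haystack := PySem.Str.join "\n" (env_keys.map PySem.Str.upper)
  -- sorted(service for service, patterns in … if any(p in haystack for p in patterns))
  PySem.List.sorted
    ((pvServicePatterns.filter (fun sp => sp.2.any (fun p => PySem.Str.isIn p haystack))).map Prod.fst)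
    (fun x => x) false

-- ===== PRECONDITION & SPEC =====
def Spec_detect_services_from_env_py (env_keys : List String) (out : List String) : Prop := out = detect_services_from_env_py_alt env_keys
instance (env_keys : List String) (out : List String) : Decidable (Spec_detect_services_from_env_py env_keys out) := by unfold Spec_detect_services_from_env_py; infer_instance

-- ===== CLAIM (what is proved, stated in full; the proofs are below) =====
def Claim_equal_detect_services_from_env_py : Prop := ∀ (env_keys : List String), Dom_detect_services_from_env_py env_keys → Spec_detect_services_from_env_py env_keys (detect_services_from_env_py env_keys)

-- ===== LEMMAS AND PROOFS =====

-- A-SIDE: the broken inner pattern loop is 'add if any pattern matches'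
theorem pvAddIfMatch_eq (acc : PySem.Set String) (s : String) (ps : List String) (k : String) :
    pvAddIfMatch acc s ps k =
      if ps.any (fun p => PySem.Str.isIn p k) then PySem.Set.add acc s else acc := by
  induction ps with
  | nil => rfl
  | cons p ps ih =>
    simp only [pvAddIfMatch, ih, List.any_cons, Bool.or_eq_true]
    split_ifs <;> first | rfl | tauto

theorem mem_pvAddIfMatch (acc : PySem.Set String) (s : String) (ps : List String) (k x : String) :
    x ∈ pvAddIfMatch acc s ps k ↔ x ∈ acc ∨ (x = s ∧ ps.any (fun p => PySem.Str.isIn p k)) := by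
  rw [pvAddIfMatch_eq]
  split_ifs with h
  · simp only [PySem.Set.mem_add, h, and_true]
  · constructor
    · intro hx
      exact Or.inl hx
    · rintro (hx | ⟨rfl, hm⟩)
      · exact hx
      · exact absurd hm h

theorem nodup_pvAddIfMatch (acc : PySem.Set String) (s : String) (ps : List String) (k : String)
    (h : acc.Nodup) : (pvAddIfMatch acc s ps k).Nodup := by
  rw [pvAddIfMatch_eq]
  split_ifs with _
  · exact PySem.Set.nodup_add acc s h
  · exact h

-- one key's pass over the whole service table
theorem mem_service_foldl (acc : PySem.Set String) (kU x : String) :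
    x ∈ pvServicePatterns.foldl (fun a sp => pvAddIfMatch a sp.1 sp.2 kU) acc ↔
      x ∈ acc ∨ ∃ sp ∈ pvServicePatterns, x = sp.1 ∧ sp.2.any (fun p => PySem.Str.isIn p kU) := by
  have general : ∀ (l : List (String × List String)) (acc : PySem.Set String),
      x ∈ l.foldl (fun a sp => pvAddIfMatch a sp.1 sp.2 kU) acc ↔
        x ∈ acc ∨ ∃ sp ∈ l, x = sp.1 ∧ sp.2.any (fun p => PySem.Str.isIn p kU) := by
    intro l
    induction l with
    | nil => simp
    | cons sp l ih =>
      intro acc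
      simp only [List.foldl_cons, ih, mem_pvAddIfMatch, List.mem_cons]
      constructor
      · rintro ((h | h) | ⟨q, hq, h⟩)
        · exact Or.inl h
        · exact Or.inr ⟨sp, Or.inl rfl, h⟩
        · exact Or.inr ⟨q, Or.inr hq, h⟩
      · rintro (h | ⟨q, (rfl | hq), h⟩)
        · exact Or.inl (Or.inl h)
        · exact Or.inl (Or.inr h)
        · exact Or.inr ⟨q, hq, h⟩
  exact general pvServicePatterns acc

theorem nodup_service_foldl (acc : PySem.Set String) (kU : String) (h : acc.Nodup) :
    (pvServicePatterns.foldl (fun a sp => pvAddIfMatch a sp.1 sp.2 kU) acc).Nodup := by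
  have general : ∀ (l : List (String × List String)) (acc : PySem.Set String), acc.Nodup →
      (l.foldl (fun a sp => pvAddIfMatch a sp.1 sp.2 kU) acc).Nodup := by
    intro l
    induction l with
    | nil => intro acc h; exact h
    | cons sp l ih =>
      intro acc h
      exact ih _ (nodup_pvAddIfMatch acc sp.1 sp.2 kU h)
  exact general pvServicePatterns acc h

-- A's accumulated set: membership over the whole key loop
theorem mem_detected (keys : List String) (acc : PySem.Set String) (x : String) :
    x ∈ keys.foldl (fun acc key =>
        pvServicePatterns.foldl (fun a sp => pvAddIfMatch a sp.1 sp.2 (PySem.Str.upper key)) acc) acc ↔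
      x ∈ acc ∨ ∃ sp ∈ pvServicePatterns, x = sp.1 ∧
        ∃ k ∈ keys, sp.2.any (fun p => PySem.Str.isIn p (PySem.Str.upper k)) := by
  induction keys generalizing acc with
  | nil => simp
  | cons key keys ih =>
    simp only [List.foldl_cons, ih, mem_service_foldl, List.mem_cons]
    constructor
    · rintro ((h | ⟨q, hq, hx, hm⟩) | ⟨q, hq, hx, k, hk, hm⟩)
      · exact Or.inl h
      · exact Or.inr ⟨q, hq, hx, key, Or.inl rfl, hm⟩
      · exact Or.inr ⟨q, hq, hx, k, Or.inr hk, hm⟩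
    · rintro (h | ⟨q, hq, hx, k, (rfl | hk), hm⟩)
      · exact Or.inl (Or.inl h)
      · exact Or.inl (Or.inr ⟨q, hq, hx, hm⟩)
      · exact Or.inr ⟨q, hq, hx, k, hk, hm⟩

theorem nodup_detected (keys : List String) (acc : PySem.Set String) (h : acc.Nodup) :
    (keys.foldl (fun acc key =>
        pvServicePatterns.foldl (fun a sp => pvAddIfMatch a sp.1 sp.2 (PySem.Str.upper key)) acc) acc).Nodup := by
  induction keys generalizing acc with
  | nil => exact h
  | cons key keys ih => exact ih _ (nodup_service_foldl acc _ h)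

-- B-SIDE: a list with a separator character that occurs in neither side of the
-- occurrence splits an infix occurrence to one side of the separator.
theorem prefix_split {c : Char} {p xs ys : List Char} (hc : c ∉ p) (h : p <+: xs ++ c :: ys) :
    p <+: xs := by
  induction p generalizing xs with
  | nil => exact List.nil_prefix
  | cons a p ih =>
    cases xs with
    | nil =>
      rcases List.cons_prefix_cons.mp h with ⟨rfl, _⟩
      exact absurd List.mem_cons_self hc
    | cons x xs =>
      rcases List.cons_prefix_cons.mp h with ⟨rfl, h'⟩
      exact List.cons_prefix_cons.mpr ⟨rfl, ih (fun hm => hc (List.mem_cons_of_mem _ hm)) h'⟩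

theorem infix_split {c : Char} {p xs ys : List Char} (hc : c ∉ p) (h : p <:+: xs ++ c :: ys) :
    p <:+: xs ∨ p <:+: ys := by
  induction xs with
  | nil =>
    rcases List.infix_cons_iff.mp h with h' | h'
    · cases p with
      | nil => exact Or.inl (List.nil_infix)
      | cons a p =>
        rcases List.cons_prefix_cons.mp h' with ⟨rfl, _⟩
        exact absurd List.mem_cons_self hc
    · exact Or.inr h'
  | cons x xs ih =>
    rcases List.infix_cons_iff.mp h with h' | h'
    · exact Or.inl ((prefix_split hc h').isInfix)
    · rcases ih h' with h'' | h''
      · exact Or.inl (h''.trans (List.suffix_cons x xs).isInfix)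
      · exact Or.inr h''

-- a '\n'-free nonempty pattern occurs in the joined haystack iff it occurs in some piece
theorem infix_join {c : Char} {p : List Char} (hp : p ≠ []) (hc : c ∉ p) :
    ∀ (kss : List (List Char)), p <:+: PySem.Chars.join [c] kss ↔ ∃ ks ∈ kss, p <:+: ks := by
  intro kss
  induction kss with
  | nil =>
    simp only [PySem.Chars.join_nil, List.mem_nil_iff]
    constructor
    · intro h
      exact absurd (List.eq_nil_of_infix_nil h) hp
    · rintro ⟨_, h, _⟩
      exact absurd h (by simp)
  | cons ks rest ih =>
    cases rest with
    | nil =>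
      simp [PySem.Chars.join_singleton]
    | cons ks2 rest' =>
      rw [PySem.Chars.join_cons_cons]
      constructor
      · intro h
        rw [List.append_assoc, List.singleton_append] at h
        rcases infix_split hc h with h' | h'
        · exact ⟨ks, List.mem_cons_self, h'⟩
        · rcases (ih).mp h' with ⟨q, hq, hq'⟩
          exact ⟨q, List.mem_cons_of_mem _ hq, hq'⟩
      · rintro ⟨q, hq, hq'⟩
        rcases List.mem_cons.mp hq with rfl | hq2
        · exact hq'.trans ((List.prefix_append q [c]).isInfix.trans ((List.prefix_append (q ++ [c]) _).isInfix))
        · exact (ih.mpr ⟨q, hq2, hq'⟩).trans ((List.suffix_append _ _).isInfix)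

-- every pattern in the table is nonempty and '\n'-free
theorem patterns_ok : ∀ sp ∈ pvServicePatterns, ∀ p ∈ sp.2,
    p.toList ≠ [] ∧ '\n' ∉ p.toList := by decide

-- pattern-in-haystack ↔ pattern-in-some-uppercased-key
theorem isIn_haystack_iff (env_keys : List String) (p : String)
    (hp : p.toList ≠ []) (hc : '\n' ∉ p.toList) :
    PySem.Str.isIn p (PySem.Str.join "\n" (env_keys.map PySem.Str.upper)) = true ↔
      ∃ k ∈ env_keys, PySem.Str.isIn p (PySem.Str.upper k) = true := by
  rw [PySem.Str.isIn_iff_infix _ _, PySem.Str.toList_join]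
  have hsep : ("\n" : String).toList = ['\n'] := rfl
  rw [hsep, List.map_map, infix_join hp hc]
  constructor
  · rintro ⟨ks, hks, hinf⟩
    rcases List.mem_map.mp hks with ⟨k, hk, rfl⟩
    exact ⟨k, hk, (PySem.Str.isIn_iff_infix _ _).mpr hinf⟩
  · rintro ⟨k, hk, hin⟩
    exact ⟨(PySem.Str.upper k).toList, List.mem_map.mpr ⟨k, hk, rfl⟩,
      (PySem.Str.isIn_iff_infix _ _).mp hin⟩

-- B's list: membership
theorem mem_alt_list (env_keys : List String) (x : String) :
    x ∈ (pvServicePatterns.filter (fun sp =>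
          sp.2.any (fun p => PySem.Str.isIn p (PySem.Str.join "\n" (env_keys.map PySem.Str.upper))))).map Prod.fst ↔
      ∃ sp ∈ pvServicePatterns, x = sp.1 ∧
        ∃ k ∈ env_keys, sp.2.any (fun p => PySem.Str.isIn p (PySem.Str.upper k)) := by
  simp only [List.mem_map, List.mem_filter, List.any_eq_true]
  constructor
  · rintro ⟨sp, ⟨hsp, p, hp, hin⟩, rfl⟩
    obtain ⟨hne, hnl⟩ := patterns_ok sp hsp p hp
    rcases (isIn_haystack_iff env_keys p hne hnl).mp hin with ⟨k, hk, hm⟩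
    exact ⟨sp, hsp, rfl, k, hk, p, hp, hm⟩
  · rintro ⟨sp, hsp, rfl, k, hk, p, hp, hm⟩
    obtain ⟨hne, hnl⟩ := patterns_ok sp hsp p hp
    exact ⟨sp, ⟨hsp, p, hp, (isIn_haystack_iff env_keys p hne hnl).mpr ⟨k, hk, hm⟩⟩, rfl⟩

theorem nodup_alt_list (env_keys : List String) :
    ((pvServicePatterns.filter (fun sp =>
        sp.2.any (fun p => PySem.Str.isIn p (PySem.Str.join "\n" (env_keys.map PySem.Str.upper))))).map Prod.fst).Nodup := by
  have hsub : List.Sublist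
      ((pvServicePatterns.filter (fun sp =>
          sp.2.any (fun p => PySem.Str.isIn p (PySem.Str.join "\n" (env_keys.map PySem.Str.upper))))).map Prod.fst)
      (pvServicePatterns.map Prod.fst) := List.Sublist.map Prod.fst List.filter_sublist
  exact (by decide : (pvServicePatterns.map Prod.fst).Nodup).sublist hsub

-- ===== VERDICT (by name: the statement is the Claim_ definition above) =====
theorem detect_services_from_env_py_spec : Claim_equal_detect_services_from_env_py := by
  intro env_keys _
  unfold Spec_detect_services_from_env_py detect_services_from_env_py detect_services_from_env_py_alt
  apply PySem.List.sorted_eq_sorted_of_perm _ _ _ (fun _ _ h => h)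
  rw [List.perm_ext_iff_of_nodup (nodup_detected env_keys PySem.Set.empty (by decide)) (nodup_alt_list env_keys)]
  intro x
  rw [mem_detected, mem_alt_list]
  simp [PySem.Set.empty]
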